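-- pv_equiv track=rewrite | github.com/dgagn/screen | screen.py | parse_xrandr_output
-- ===== SOURCE A (Python) =====
-- def parse_xrandr_output(output):
--     """Parse xrandr output to check if HDMI-1 is connected and to find its resolution."""
--     lines = output.splitlines()
--     hdmi_connected = False
--     hdmi_resolution = None
--
--     for i, line in enumerate(lines):
--         if "HDMI-1 connected" in line:
--             hdmi_connected = True
--             for res_line in lines[i+1:]:
--                 if "*" in res_line or "+" in res_line:
--                     hdmi_resolution = res_line.split()[0]
--                     break
--             break
--
--     return hdmi_connected, hdmi_resolution
-- ===== SOURCE B (Python) =====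
-- def parse_xrandr_output(output):
--     """Parse xrandr output to check if HDMI-1 is connected and to find its resolution."""
--     # One pass over the lines in REVERSE, maintaining for the suffix already seen:
--     #   first_mark  = first word of its leftmost marked line
--     #   (connected, resolution) = the answer for that suffix.
--     # Prepending a line updates the answer (a 'HDMI-1 connected' line takes the
--     # marks strictly after it, i.e. first_mark BEFORE this line is folded in).
--     connected, resolution = False, None
--     first_mark = None
--     for line in reversed(output.splitlines()):
--         if "HDMI-1 connected" in line:
--             connected, resolution = True, first_mark
--         if "*" in line or "+" in line:
--             first_mark = line.split()[0]
--     return connected, resolution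
-- ===== Notes on version B (the rewrite author's own statement) =====
-- stated objective: alternative
-- what changed: Replaced A's forward scan with nested inner loop, a slice of the remaining lines and breaks by a single reverse pass (a right fold over the lines) maintaining two accumulators: the answer for the suffix seen so far and the first word of its leftmost marker line; no index bookkeeping, slicing or early exit.
import Mathlib
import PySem

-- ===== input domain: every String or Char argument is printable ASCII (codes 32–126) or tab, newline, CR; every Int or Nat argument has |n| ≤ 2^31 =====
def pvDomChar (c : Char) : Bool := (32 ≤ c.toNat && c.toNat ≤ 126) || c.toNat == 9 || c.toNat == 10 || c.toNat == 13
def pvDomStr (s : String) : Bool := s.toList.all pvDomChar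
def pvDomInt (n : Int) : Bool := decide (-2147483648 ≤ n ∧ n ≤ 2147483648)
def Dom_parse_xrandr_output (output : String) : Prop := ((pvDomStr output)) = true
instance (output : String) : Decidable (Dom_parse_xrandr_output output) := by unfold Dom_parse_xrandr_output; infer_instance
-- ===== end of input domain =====

-- B replaces A's forward scan with nested inner loop over the slice lines[i+1:]
-- by one reverse pass (right fold) with two accumulators; objective: alternative.

-- ===== PORT A =====
-- inner loop of A: scan the remaining lines for the first one containing a marker
-- (line.split()[0]: the marker character is never whitespace, so split() is
--  nonempty whenever the branch is taken; headD is therefore never the default)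
def pvA_inner : List String → Option String
  | [] => none
  | res_line :: rest =>
    if PySem.Str.isIn "*" res_line || PySem.Str.isIn "+" res_line then
      some ((PySem.Str.split₀ res_line).headD "")
    else pvA_inner rest

-- outer loop: for i, line in enumerate(lines): …
def pvA_outer (lines : List String) : List (Int × String) → Bool × Option String
  | [] => (false, none)
  | (i, line) :: rest =>
    if PySem.Str.isIn "HDMI-1 connected" line then
      (true, pvA_inner (PySem.List.slice lines (some (i + 1)) none))
    else pvA_outer lines rest

def parse_xrandr_output (output : String) : Bool × Option String :=
  let lines := PySem.Str.splitlines output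
  pvA_outer lines (PySem.List.enumerate lines 0)

-- ===== PORT B =====
-- loop body of 'for line in reversed(lines)' over state (connected, resolution, first_mark)
def pvB_step (st : Bool × Option String × Option String) (line : String) :
    Bool × Option String × Option String :=
  let st1 := if PySem.Str.isIn "HDMI-1 connected" line then (true, st.2.2, st.2.2) else st
  if PySem.Str.isIn "*" line || PySem.Str.isIn "+" line then
    (st1.1, st1.2.1, some ((PySem.Str.split₀ line).headD ""))
  else st1

def parse_xrandr_output_alt (output : String) : Bool × Option String :=
  let st := ((PySem.Str.splitlines output).reverse).foldl pvB_step (false, none, none)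
  (st.1, st.2.1)

-- ===== PRECONDITION & SPEC =====
def Spec_parse_xrandr_output (output : String) (out : Bool × Option String) : Prop := out = parse_xrandr_output_alt output
instance (output : String) (out : Bool × Option String) : Decidable (Spec_parse_xrandr_output output out) := by unfold Spec_parse_xrandr_output; infer_instance

-- ===== CLAIM (what is proved, stated in full; the proofs are below) =====
def Claim_equal_parse_xrandr_output : Prop := ∀ (output : String), Dom_parse_xrandr_output output → Spec_parse_xrandr_output output (parse_xrandr_output output)

-- ===== LEMMAS AND PROOFS =====

-- proof-side recursive reading of B's reverse fold: the answer for a suffix of lines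
def pvRec : List String → Bool × Option String
  | [] => (false, none)
  | line :: rest =>
    if PySem.Str.isIn "HDMI-1 connected" line then (true, pvA_inner rest)
    else pvRec rest

-- B's fold computes (answer of the suffix, first marked line's head word of the suffix)
theorem pvB_fold_eq (ls : List String) :
    ls.foldr (fun line st => pvB_step st line) (false, none, none)
      = ((pvRec ls).1, (pvRec ls).2, pvA_inner ls) := by
  induction ls with
  | nil => rfl
  | cons l rest ih =>
    rw [List.foldr_cons, ih]
    simp only [pvB_step, pvRec, pvA_inner]
    by_cases h : PySem.Str.isIn "HDMI-1 connected" l = true <;>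
      by_cases h2 : (PySem.Str.isIn "*" l || PySem.Str.isIn "+" l) = true <;>
      simp_all

-- main invariant: A's scan of the enumerate-suffix of lines = pre ++ suf equals pvRec suf
theorem pvA_outer_eq (pre suf : List String) :
    pvA_outer (pre ++ suf) (PySem.List.enumerate suf (pre.length : Int)) = pvRec suf := by
  induction suf generalizing pre with
  | nil => rfl
  | cons l rest ih =>
    rw [PySem.List.enumerate_cons]
    by_cases h : PySem.Str.isIn "HDMI-1 connected" l = true
    · simp only [pvA_outer, pvRec, h, if_true]
      have h1 : ((pre.length : Int) + 1) = ((pre.length + 1 : Nat) : Int) := by push_cast; ring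
      rw [h1, PySem.List.slice_from_natCast]
      have h2 : (pre ++ l :: rest).drop (pre.length + 1) = rest := by
        rw [show pre ++ l :: rest = (pre ++ [l]) ++ rest by simp,
            List.drop_append_of_le_length (by simp)]
        simp
      rw [h2]
    · simp only [pvA_outer, pvRec, h, if_false, Bool.false_eq_true]
      have h4 : ((pre.length : Int) + 1) = (((pre ++ [l]).length : Nat) : Int) := by simp
      rw [show pre ++ l :: rest = (pre ++ [l]) ++ rest by simp, h4]
      exact ih (pre ++ [l])

-- ===== VERDICT (by name: the statement is the Claim_ definition above) =====
theorem parse_xrandr_output_spec : Claim_equal_parse_xrandr_output := by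
  intro output _
  unfold Spec_parse_xrandr_output parse_xrandr_output parse_xrandr_output_alt
  rw [List.foldl_reverse, pvB_fold_eq]
  have := pvA_outer_eq [] (PySem.Str.splitlines output)
  simpa using this
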